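-- pv_equiv track=rewrite | github.com/richard-fty/apex-agent | core/src/tools/shell.py | _detect_changed_files
-- ===== SOURCE A (Python) =====
-- def _detect_changed_files(
--     before: dict[str, tuple[int, int]],
--     after: dict[str, tuple[int, int]],
-- ) -> list[str]:
--     changed: list[str] = []
--     for path, meta in after.items():
--         if before.get(path) != meta:
--             changed.append(path)
--     return sorted(changed)
-- ===== SOURCE B (Python) =====
-- def _detect_changed_files(before, after):
--     b = sorted(before.items(), key=lambda kv: kv[0])
--     a = sorted(after.items(), key=lambda kv: kv[0])
--     changed = []
--     i = 0
--     for path, meta in a: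
--         while i < len(b) and b[i][0] < path:
--             i += 1
--         if i < len(b) and b[i] == (path, meta):
--             i += 1
--         else:
--             changed.append(path)
--     return changed
-- ===== Notes on version B (the rewrite author's own statement) =====
-- stated objective: alternative
-- what changed: Replaces the per-path dict lookup loop followed by a final sort with sorting both item lists by path first and running a two-pointer merge that emits unmatched after-paths in already-sorted order (no dict lookups, no final sort).
import Mathlib
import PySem

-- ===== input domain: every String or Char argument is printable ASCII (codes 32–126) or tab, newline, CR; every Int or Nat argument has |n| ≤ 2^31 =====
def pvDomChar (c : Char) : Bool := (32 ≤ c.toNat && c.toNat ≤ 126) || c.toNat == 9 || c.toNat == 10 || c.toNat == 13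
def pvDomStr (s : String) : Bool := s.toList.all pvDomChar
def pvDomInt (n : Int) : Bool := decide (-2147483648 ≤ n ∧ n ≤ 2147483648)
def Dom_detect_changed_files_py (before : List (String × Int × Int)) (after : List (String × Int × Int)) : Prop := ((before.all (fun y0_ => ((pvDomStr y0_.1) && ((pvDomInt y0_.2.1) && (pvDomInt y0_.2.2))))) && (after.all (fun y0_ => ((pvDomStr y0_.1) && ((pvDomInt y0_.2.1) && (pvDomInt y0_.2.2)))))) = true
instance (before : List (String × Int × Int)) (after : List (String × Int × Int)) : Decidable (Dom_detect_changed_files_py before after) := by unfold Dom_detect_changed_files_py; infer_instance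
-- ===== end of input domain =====

-- B replaces A's dict-lookup loop + final sort by a two-pointer merge of the two key-sorted item lists (objective: alternative algorithm, same output).

-- ===== PORT A =====
-- A: loop over after.items(), append path when before.get(path) != meta, then sort the collected paths
def detect_changed_files_py (before : List (String × Int × Int)) (after : List (String × Int × Int)) : List String :=
  let bd := PySem.Dict.ofList before
  let ad := PySem.Dict.ofList after
  let changed := ad.items.foldl (fun acc pm => if bd.get? pm.1 ≠ some pm.2 then acc ++ [pm.1] else acc) []
  PySem.List.sorted changed (fun x => x) false

-- ===== PORT B =====
-- B: two-pointer merge over the key-sorted item lists; the `while` advancing the pointer is the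
-- dropWhile, the `for` over `a` is the recursion on the second list (step-for-step transcription of Source B)
def pvMergeChanged : List (String × Int × Int) → List (String × Int × Int) → List String
  | _, [] => []
  | b, (p, m) :: rest =>
      let b' := b.dropWhile (fun q => decide (q.1 < p))
      match b' with
      | q :: btl => if q = (p, m) then pvMergeChanged btl rest
                    else p :: pvMergeChanged b' rest
      | [] => p :: pvMergeChanged [] rest
  termination_by b a => a.length

def detect_changed_files_py_alt (before : List (String × Int × Int)) (after : List (String × Int × Int)) : List String :=
  let b := PySem.List.sorted (PySem.Dict.ofList before).items (fun kv => kv.1) false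
  let a := PySem.List.sorted (PySem.Dict.ofList after).items (fun kv => kv.1) false
  pvMergeChanged b a

-- ===== PRECONDITION & SPEC =====
def Spec_detect_changed_files_py (before : List (String × Int × Int)) (after : List (String × Int × Int)) (out : List String) : Prop := out = detect_changed_files_py_alt before after
instance (before : List (String × Int × Int)) (after : List (String × Int × Int)) (out : List String) : Decidable (Spec_detect_changed_files_py before after out) := by unfold Spec_detect_changed_files_py; infer_instance

-- ===== CLAIM (what is proved, stated in full; the proofs are below) =====
def Claim_equal_detect_changed_files_py : Prop := ∀ (before : List (String × Int × Int)) (after : List (String × Int × Int)), Dom_detect_changed_files_py before after → Spec_detect_changed_files_py before after (detect_changed_files_py before after)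

-- ===== LEMMAS AND PROOFS =====

-- core invariant: on strictly key-sorted lists the merge emits exactly the paths of the
-- `after` items that do not occur (as a (path, meta) pair) in `b`
theorem pvMergeChanged_eq (a : List (String × Int × Int)) (b : List (String × Int × Int))
    (hb : b.Pairwise (fun x y => x.1 < y.1)) (ha : a.Pairwise (fun x y => x.1 < y.1)) :
    pvMergeChanged b a = (a.filter (fun pm => !(b.contains pm))).map Prod.fst := by
  induction a generalizing b with
  | nil => simp [pvMergeChanged]
  | cons pm rest ih =>
    obtain ⟨p, m⟩ := pm
    obtain ⟨ha1, ha2⟩ := List.pairwise_cons.1 ha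
    have hrest : ∀ x ∈ rest, p < x.1 := fun x hx => ha1 x hx
    set b' := b.dropWhile (fun q => decide (q.1 < p)) with hb'def
    have hsplit : b.takeWhile (fun q => decide (q.1 < p)) ++ b' = b :=
      List.takeWhile_append_dropWhile
    have htake : ∀ x ∈ b.takeWhile (fun q => decide (q.1 < p)), x.1 < p := by
      intro x hx
      simpa using List.mem_takeWhile_imp hx
    have hb'pw : b'.Pairwise (fun x y => x.1 < y.1) :=
      hb.sublist (List.dropWhile_sublist _)
    have hmemb' : ∀ x : String × Int × Int, p ≤ x.1 → (x ∈ b ↔ x ∈ b') := by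
      intro x hx
      constructor
      · intro hxb
        rw [← hsplit] at hxb
        rcases List.mem_append.1 hxb with h1 | h1
        · exact absurd (htake x h1) (not_lt.2 hx)
        · exact h1
      · intro hxb'
        rw [← hsplit]; exact List.mem_append.2 (Or.inr hxb')
    show pvMergeChanged b ((p, m) :: rest) = _
    rw [pvMergeChanged]
    cases hcase : b' with
    | nil =>
      have hnotin : ((p, m) : String × Int × Int) ∉ b := by
        rw [hmemb' (p, m) le_rfl, hcase]; simp
      have hrestnot : ∀ x ∈ rest, x ∉ b := by
        intro x hx
        rw [hmemb' x (le_of_lt (hrest x hx)), hcase]; simp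
      simp only [← hb'def, hcase]
      rw [ih [] (by simp) ha2, List.filter_cons, if_pos (by simp [hnotin]), List.map_cons]
      congr 1
      refine congrArg _ (List.filter_congr ?_)
      intro x hx
      simp [hrestnot x hx]
    | cons q btl =>
      have hqge : ¬ q.1 < p := by
        have := List.head?_dropWhile_not (fun q : String × Int × Int => decide (q.1 < p)) b
        rw [← hb'def, hcase] at this; simpa using this
      have hb'pw' : (q :: btl).Pairwise (fun x y : String × Int × Int => x.1 < y.1) :=
        hcase ▸ hb'pw
      have hbtl : ∀ x ∈ btl, q.1 < x.1 := (List.pairwise_cons.1 hb'pw').1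
      simp only [← hb'def, hcase]
      by_cases heq : q = (p, m)
      · have hin : ((p, m) : String × Int × Int) ∈ b := by
          rw [hmemb' (p, m) le_rfl, hcase, heq]; simp
        have hrestmem : ∀ x ∈ rest, (x ∈ b ↔ x ∈ btl) := by
          intro x hx
          rw [hmemb' x (le_of_lt (hrest x hx)), hcase]
          have hxq : x ≠ q := by
            intro h
            have : p < x.1 := hrest x hx
            rw [h, heq] at this
            exact lt_irrefl _ this
          simp [List.mem_cons, hxq]
        rw [if_pos heq, ih btl (List.pairwise_cons.1 hb'pw').2 ha2, List.filter_cons,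
            if_neg (by simp [hin])]
        refine congrArg _ (List.filter_congr ?_)
        intro x hx
        simp [hrestmem x hx]
      · have hnotin : ((p, m) : String × Int × Int) ∉ b := by
          rw [hmemb' (p, m) le_rfl, hcase]
          intro hxb
          rcases List.mem_cons.1 hxb with h1 | h1
          · exact heq h1.symm
          · exact absurd (lt_of_le_of_lt (not_lt.1 hqge) (hbtl _ h1)) (lt_irrefl p)
        have hrestmem : ∀ x ∈ rest, (x ∈ b ↔ x ∈ q :: btl) := by
          intro x hx
          rw [hmemb' x (le_of_lt (hrest x hx)), hcase]
        rw [if_neg heq, ih (q :: btl) hb'pw' ha2, List.filter_cons,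
            if_pos (by simp [hnotin]), List.map_cons]
        congr 1
        refine congrArg _ (List.filter_congr ?_)
        intro x hx
        simp [hrestmem x hx]

theorem pvStrictOfLe (l : List (String × Int × Int))
    (hle : l.Pairwise (fun x y => x.1 ≤ y.1)) (hnd : (l.map Prod.fst).Nodup) :
    l.Pairwise (fun x y => x.1 < y.1) := by
  have hne : l.Pairwise (fun x y => x.1 ≠ y.1) := by
    simpa [List.Nodup, List.pairwise_map] using hnd
  exact (hle.and hne).imp (fun h => lt_of_le_of_ne h.1 h.2)

theorem pvSortedFilterEqMerge (before after : List (String × Int × Int)) :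
    PySem.List.sorted ((PySem.Dict.ofList after).items.foldl
        (fun acc pm => if (PySem.Dict.ofList before).get? pm.1 ≠ some pm.2 then acc ++ [pm.1] else acc) [])
      (fun x => x) false
    = pvMergeChanged (PySem.List.sorted (PySem.Dict.ofList before).items (fun kv => kv.1) false)
        (PySem.List.sorted (PySem.Dict.ofList after).items (fun kv => kv.1) false) := by
  set bitems := (PySem.Dict.ofList before).items with hbi
  set aitems := (PySem.Dict.ofList after).items with hai
  set bsort := PySem.List.sorted bitems (fun kv => kv.1) false with hbs
  set asort := PySem.List.sorted aitems (fun kv => kv.1) false with has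
  have hbkeys : (PySem.Dict.ofList before).keys.Nodup := PySem.Dict.nodup_keys_ofList before
  have hakeys : (PySem.Dict.ofList after).keys.Nodup := PySem.Dict.nodup_keys_ofList after
  have hbknd : (bitems.map Prod.fst).Nodup := by
    simpa [PySem.Dict.keys, hbi] using hbkeys
  have haknd : (aitems.map Prod.fst).Nodup := by
    simpa [PySem.Dict.keys, hai] using hakeys
  have hbperm : bsort.Perm bitems := PySem.List.sorted_perm bitems (fun kv => kv.1) false
  have haperm : asort.Perm aitems := PySem.List.sorted_perm aitems (fun kv => kv.1) false
  have hbstrict : bsort.Pairwise (fun x y => x.1 < y.1) :=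
    pvStrictOfLe _ (PySem.List.sorted_pairwise bitems (fun kv => kv.1))
      (((hbperm.map Prod.fst).nodup_iff).2 hbknd)
  have hastrict : asort.Pairwise (fun x y => x.1 < y.1) :=
    pvStrictOfLe _ (PySem.List.sorted_pairwise aitems (fun kv => kv.1))
      (((haperm.map Prod.fst).nodup_iff).2 haknd)
  have hpred : ∀ pm : String × Int × Int,
      (decide ((PySem.Dict.ofList before).get? pm.1 ≠ some pm.2)) = (!(bsort.contains pm)) := by
    intro pm
    have h1 : (PySem.Dict.ofList before).get? pm.1 = some pm.2 ↔ pm ∈ bsort := by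
      rw [PySem.Dict.get?_eq_some_iff_mem_items _ _ _ hbkeys, ← hbi,
          ← PySem.List.mem_sorted (key := fun kv : String × Int × Int => kv.1) (rev := false), ← hbs]
    by_cases h : pm ∈ bsort
    · simp [h1, h]
    · simp [h1, h]
  rw [PySem.List.foldl_append_ite
        (p := fun pm : String × Int × Int => (PySem.Dict.ofList before).get? pm.1 ≠ some pm.2)
        (f := fun pm : String × Int × Int => pm.1), List.nil_append]
  rw [pvMergeChanged_eq asort bsort hbstrict hastrict]
  have hfun : (fun pm : String × Int × Int => decide ((PySem.Dict.ofList before).get? pm.1 ≠ some pm.2))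
      = (fun pm => !(bsort.contains pm)) := funext hpred
  rw [hfun]
  apply PySem.List.sorted_eq_of_perm_of_pairwise_lt (key := fun x : String => x)
  · exact ((haperm.filter _).map _)
  · rw [List.pairwise_map]
    exact hastrict.sublist (List.filter_sublist (l := asort))

-- ===== VERDICT (by name: the statement is the Claim_ definition above) =====
theorem detect_changed_files_py_spec : Claim_equal_detect_changed_files_py := by
  intro before after _
  unfold Spec_detect_changed_files_py detect_changed_files_py detect_changed_files_py_alt
  exact pvSortedFilterEqMerge before after
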